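-- pv_equiv track=rewrite | github.com/SinaGam/GemcraftFWSaveEditor | main.py | base64_to_base10
-- ===== SOURCE A (Python) =====
-- BASE64CHARS = "ABCDEFGHIJKLMNOPQRSTUVWXYZabcdefghijklmnopqrstuvwxyz0123456789+/="
--
-- def base64_to_base10(base64_str: str) -> int:
--     """
--     Converts a base64-encoded string into a base-10 integer.
--
--     Args:
--         base64_str (str): A base64-encoded string representing a number.
--
--     Returns:
--         int: The base-10 integer representation of the base64-encoded input.
--     """
--     is_negative = base64_str.startswith("-")
--     if is_negative:
--         base64_str = base64_str[1:]
--
--     base10_value = 0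
--     length = len(base64_str)
--
--     for i in range(length):
--         base10_value += BASE64CHARS.index(base64_str[i]) * (64 ** (length - i - 1))
--
--     if is_negative:
--         base10_value *= -1
--
--     return base10_value
-- ===== SOURCE B (Python) =====
-- BASE64CHARS = "ABCDEFGHIJKLMNOPQRSTUVWXYZabcdefghijklmnopqrstuvwxyz0123456789+/="
-- B64_INDEX = {c: i for i, c in enumerate(BASE64CHARS)}
--
-- def base64_to_base10(base64_str: str) -> int:
--     sign = 1
--     if base64_str.startswith("-"):
--         sign = -1
--         base64_str = base64_str[1:]
--     value = 0
--     for ch in base64_str: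
--         value = value * 64 + B64_INDEX[ch]
--     return sign * value
-- ===== Notes on version B (the rewrite author's own statement) =====
-- stated objective: faster
-- what changed: Replaces the positional sum sum(index(c) * 64**(n-i-1)) with its per-character list scan by a single Horner pass (value = value*64 + digit) over a precomputed char->index dict.
import Mathlib
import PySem

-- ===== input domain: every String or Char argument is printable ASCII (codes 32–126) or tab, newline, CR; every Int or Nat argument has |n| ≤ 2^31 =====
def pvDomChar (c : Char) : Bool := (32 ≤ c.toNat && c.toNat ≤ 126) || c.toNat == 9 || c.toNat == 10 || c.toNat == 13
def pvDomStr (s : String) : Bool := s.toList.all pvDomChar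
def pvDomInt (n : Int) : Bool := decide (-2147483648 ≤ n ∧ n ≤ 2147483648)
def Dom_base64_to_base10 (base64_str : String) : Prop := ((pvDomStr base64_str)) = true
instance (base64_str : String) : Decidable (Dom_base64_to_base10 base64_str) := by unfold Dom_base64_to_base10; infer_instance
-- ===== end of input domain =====

-- B replaces A's positional-power sum (64**(n-i-1) per character, each via a string scan)
-- by a single Horner pass with a precomputed char->index dictionary; measurably faster.


-- ===== PORT A =====
def pvB64 : List Char :=
  "ABCDEFGHIJKLMNOPQRSTUVWXYZabcdefghijklmnopqrstuvwxyz0123456789+/=".toList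

def base64_to_base10 (base64_str : String) : Int :=
  let is_negative := PySem.Str.startswith base64_str "-"
  let s := if is_negative then PySem.Str.slice base64_str (some 1) none else base64_str
  let l := s.toList
  let length := l.length
  let base10_value :=
    (PySem.List.pyRange 0 (length : Int) 1).foldl
      (fun acc i =>
        acc + (((PySem.List.index? pvB64 (PySem.List.pyGetD l i ' ')).getD 0 : Nat) : Int)
                * (64 : Int) ^ ((length : Int) - i - 1).toNat) 0
  if is_negative then base10_value * (-1) else base10_value

-- ===== PORT B =====
def pvB64Index : PySem.Dict Char Int :=
  (PySem.List.enumerate pvB64 0).foldl (fun d p => d.insert p.2 p.1) PySem.Dict.empty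

def base64_to_base10_alt (base64_str : String) : Int :=
  let neg := PySem.Str.startswith base64_str "-"
  let sign : Int := if neg then -1 else 1
  let s := if neg then PySem.Str.slice base64_str (some 1) none else base64_str
  let value := s.toList.foldl (fun v c => v * 64 + pvB64Index.getD c 0) 0
  sign * value

-- ===== PRECONDITION & SPEC =====
-- Pre_ excludes exactly the strings containing (after the optional leading '-') a character
-- not in BASE64CHARS: there Python A raises ValueError (and B raises KeyError).
def Pre_base64_to_base10 (base64_str : String) : Prop :=
  (if PySem.Str.startswith base64_str "-" then base64_str.toList.tail
   else base64_str.toList).all (fun c => pvB64.contains c) = true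
instance (base64_str : String) : Decidable (Pre_base64_to_base10 base64_str) := by
  unfold Pre_base64_to_base10; infer_instance

def pvWitness_base64_to_base10 : String := "-B9+"

def Spec_base64_to_base10 (base64_str : String) (out : Int) : Prop := out = base64_to_base10_alt base64_str
instance (base64_str : String) (out : Int) : Decidable (Spec_base64_to_base10 base64_str out) := by unfold Spec_base64_to_base10; infer_instance

-- ===== CLAIM (what is proved, stated in full; the proofs are below) =====
def Claim_equal_base64_to_base10 : Prop := ∀ (base64_str : String), Dom_base64_to_base10 base64_str → Pre_base64_to_base10 base64_str → Spec_base64_to_base10 base64_str (base64_to_base10 base64_str)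

-- ===== LEMMAS AND PROOFS =====

-- the common digit value of a character, and the common reference sum both loops compute
def pvDigit (c : Char) : Int := ((PySem.List.index? pvB64 c).getD 0 : Nat)

def pvRefSum : List Char → Int
  | [] => 0
  | c :: t => pvDigit c * 64 ^ t.length + pvRefSum t

-- B's dict lookup equals A's index-scan digit, for every character
theorem pvDict_get?_foldl_not_mem (ps : List (Int × Char)) (d : PySem.Dict Char Int)
    (c : Char) (hc : c ∉ ps.map (·.2)) :
    (ps.foldl (fun d p => d.insert p.2 p.1) d).get? c = d.get? c := by
  induction ps generalizing d with
  | nil => rfl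
  | cons p t ih =>
    simp only [List.map_cons, List.mem_cons, not_or] at hc
    simp only [List.foldl_cons]
    rw [ih _ hc.2, PySem.Dict.get?_insert_of_ne _ _ hc.1]

theorem pvEnum_mem (L : List Char) (s : Int) :
    ∀ (k : Nat) (hk : k < L.length), (s + (k : Int), L[k]) ∈ PySem.List.enumerate L s := by
  induction L generalizing s with
  | nil => intro k hk; simp at hk
  | cons x t ih =>
    intro k hk
    rw [PySem.List.enumerate_cons]
    cases k with
    | zero => simp
    | succ k =>
      have := ih (s + 1) k (by simpa using Nat.lt_of_succ_lt_succ hk)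
      have harith : s + ((k + 1 : Nat) : Int) = s + 1 + (k : Int) := by push_cast; ring
      rw [harith]
      simpa using Or.inr this

set_option maxRecDepth 100000 in
theorem pvB64_nodup : pvB64.Nodup := by decide

set_option maxRecDepth 100000 in
set_option maxHeartbeats 2000000 in
theorem pvItems_eq : pvB64Index.items
    = (PySem.List.enumerate pvB64 0).map (fun a => (a.2, a.1)) := by
  have h := PySem.Dict.items_foldl_insert_fresh (PySem.List.enumerate pvB64 0)
      (fun p => p.2) (fun p => p.1) PySem.Dict.empty
      (by intro a _; exact PySem.Dict.contains_empty _)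
      (by rw [PySem.List.map_snd_enumerate]; exact pvB64_nodup)
  simpa [pvB64Index] using h

set_option maxRecDepth 100000 in
set_option maxHeartbeats 2000000 in
theorem pvKeys_nodup : pvB64Index.keys.Nodup := by
  unfold pvB64Index
  exact PySem.Dict.nodup_keys_foldl_insert_key (PySem.List.enumerate pvB64 0)
    (fun p : Int × Char => p.2) (fun _ p => p.1) PySem.Dict.empty
    PySem.Dict.nodup_keys_empty

theorem pvDigit_eq (c : Char) : pvB64Index.getD c 0 = pvDigit c := by
  cases hidx : PySem.List.index? pvB64 c with
  | none =>
    have h : c ∉ pvB64 := (PySem.List.index?_eq_none_iff _ _).mp hidx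
    have h1 : pvB64Index.get? c = none := by
      have := pvDict_get?_foldl_not_mem (PySem.List.enumerate pvB64 0) PySem.Dict.empty c
        (by rwa [PySem.List.map_snd_enumerate])
      simpa [pvB64Index, PySem.Dict.get?_empty] using this
    rw [PySem.List.index?_eq_idxOf?] at hidx
    simp [PySem.Dict.getD_eq_get?_getD, h1, pvDigit, hidx]
  | some k =>
    obtain ⟨hk, hget, -⟩ := PySem.List.getElem_of_index?_eq_some hidx
    have hm : ((0 : Int) + (k : Int), pvB64[k]) ∈ PySem.List.enumerate pvB64 0 :=
      pvEnum_mem pvB64 0 k hk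
    have hm2 : (c, (k : Int)) ∈ pvB64Index.items := by
      rw [pvItems_eq]
      have := List.mem_map_of_mem (f := fun a : Int × Char => (a.2, a.1)) hm
      simpa [hget] using this
    rw [PySem.Dict.getD_of_mem_items _ hm2 pvKeys_nodup 0]
    rw [PySem.List.index?_eq_idxOf?] at hidx
    simp [pvDigit, hidx]

-- Horner's fold with seed a equals a * 64^len + the reference sum
theorem pvHorner_eq (l : List Char) (a : Int) :
    l.foldl (fun v c => v * 64 + pvB64Index.getD c 0) a
      = a * 64 ^ l.length + pvRefSum l := by
  induction l generalizing a with
  | nil => simp [pvRefSum]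
  | cons c t ih =>
    rw [List.foldl_cons, ih]
    simp only [pvRefSum, List.length_cons, pvDigit_eq]
    ring

-- A's positional-power sum over range(len) equals the reference sum
theorem pvSum_eq (l : List Char) :
    ((List.range l.length).map
      (fun k : Nat => pvDigit (PySem.List.pyGetD l ((k : Nat) : Int) ' ')
          * (64 : Int) ^ ((l.length : Int) - ((k : Nat) : Int) - 1).toNat)).sum
      = pvRefSum l := by
  induction l with
  | nil => simp [pvRefSum]
  | cons c t ih =>
    rw [List.length_cons, List.range_succ_eq_map]
    simp only [List.map_cons, List.map_map, List.sum_cons, Function.comp_def,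
      Nat.succ_eq_add_one]
    have h0 : (PySem.List.pyGetD (c :: t) ((0 : Nat) : Int) ' ') = c := by
      simp
    have hrest : ∀ x ∈ List.range t.length,
        pvDigit (PySem.List.pyGetD (c :: t) ((x + 1 : Nat) : Int) ' ')
          * (64 : Int) ^ (((t.length + 1 : Nat) : Int) - ((x + 1 : Nat) : Int) - 1).toNat
        = pvDigit (PySem.List.pyGetD t ((x : Nat) : Int) ' ')
          * (64 : Int) ^ ((t.length : Int) - ((x : Nat) : Int) - 1).toNat := by
      intro x _
      have h1 : (((t.length + 1 : Nat) : Int) - ((x + 1 : Nat) : Int) - 1)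
          = ((t.length : Int) - ((x : Nat) : Int) - 1) := by push_cast; ring
      rw [h1, PySem.List.pyGetD_natCast, PySem.List.pyGetD_natCast]
      simp [List.getD]
    rw [List.map_congr_left hrest, ih, h0, pvRefSum]
    have h2 : (((t.length + 1 : Nat) : Int) - ((0 : Nat) : Int) - 1).toNat = t.length := by
      simp
    rw [h2]

theorem pvA_sum_eq (l : List Char) :
    (PySem.List.pyRange 0 (l.length : Int) 1).foldl
      (fun acc i => acc + pvDigit (PySem.List.pyGetD l i ' ')
          * (64 : Int) ^ ((l.length : Int) - i - 1).toNat) 0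
      = pvRefSum l := by
  rw [PySem.List.foldl_add, PySem.List.pyRange_one 0 (l.length : Int)]
  simp only [sub_zero, Int.toNat_natCast, zero_add, List.map_map, Function.comp_def]
  exact pvSum_eq l

-- ===== VERDICT (by name: the statement is the Claim_ definition above) =====
theorem base64_to_base10_spec : Claim_equal_base64_to_base10 := by
  intro s _ _
  unfold Spec_base64_to_base10 base64_to_base10 base64_to_base10_alt
  simp only []
  have key : ∀ t : String,
      (PySem.List.pyRange 0 (t.toList.length : Int) 1).foldl
        (fun acc i => acc + (((PySem.List.index? pvB64 (PySem.List.pyGetD t.toList i ' ')).getD 0 : Nat) : Int)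
            * (64 : Int) ^ ((t.toList.length : Int) - i - 1).toNat) 0
      = t.toList.foldl (fun v c => v * 64 + pvB64Index.getD c 0) 0 := by
    intro t
    rw [pvHorner_eq]
    simpa [pvDigit] using pvA_sum_eq t.toList
  by_cases hneg : PySem.Str.startswith s "-"
  · simp only [hneg, if_pos, key]
    ring
  · simp only [hneg, Bool.false_eq_true, if_false, key]
    ring
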